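-- pv_equiv track=rewrite | github.com/qtt153759/LeetCode | python/cracking_coding_interview/one_way.py | check_at_most_two
-- ===== SOURCE A (Python) =====
-- def check_at_most_two(bitmask):
--     count=0
--     while bitmask:
--         if (bitmask&1)==1:
--             count+=1
--             if count>2:
--                  return False
--         bitmask>>=1
--     return True
-- ===== SOURCE B (Python) =====
-- def check_at_most_two(bitmask):
--     # Brian Kernighan: clear the lowest set bit each iteration (one step per set bit)
--     count = 0
--     while bitmask:
--         bitmask &= bitmask - 1
--         count += 1
--         if count > 2:
--             return False
--     return True
-- ===== Notes on version B (the rewrite author's own statement) =====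
-- stated objective: alternative
-- what changed: Per-bit-position shift-and-test loop replaced by Brian Kernighan's bit-clearing loop (mask AND mask-minus-one), iterating once per set bit instead of once per bit position, with the same early exit on the third set bit.
import Mathlib
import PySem

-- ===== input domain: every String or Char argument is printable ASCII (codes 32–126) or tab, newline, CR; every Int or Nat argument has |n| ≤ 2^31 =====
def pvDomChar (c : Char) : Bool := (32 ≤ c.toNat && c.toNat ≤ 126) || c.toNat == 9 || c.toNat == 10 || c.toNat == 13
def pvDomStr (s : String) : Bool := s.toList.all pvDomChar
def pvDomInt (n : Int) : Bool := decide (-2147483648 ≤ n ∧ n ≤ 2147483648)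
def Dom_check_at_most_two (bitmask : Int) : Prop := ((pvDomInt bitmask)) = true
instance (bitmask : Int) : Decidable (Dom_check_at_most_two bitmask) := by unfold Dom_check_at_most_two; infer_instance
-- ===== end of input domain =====

-- B replaces A's per-bit-position shift-and-test loop by Brian Kernighan's bit-clearing
-- loop (one iteration per set bit), keeping the early exit on the third set bit; same values everywhere.

-- ===== PORT A =====
-- termination helper for the even branch (cited by decreasing_by)
theorem pvShiftAbsLt (b : Int) (h0 : b ≠ 0) (h1 : ¬ PySem.Int.band b 1 = 1) :
    (b >>> (1 : Nat)).natAbs < b.natAbs := by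
  have hm : PySem.Int.band b 1 = PySem.Int.mod b 2 := PySem.Int.band_one b
  have hm2 : PySem.Int.mod b 2 = b % 2 := PySem.Int.mod_eq_emod_of_pos (by norm_num)
  have hdvd : (2 : Int) ∣ b := by
    apply Int.dvd_of_emod_eq_zero
    have := Int.emod_two_eq_zero_or_one b
    omega
  obtain ⟨k, rfl⟩ := hdvd
  have : (2 * k) >>> (1 : Nat) = (2 * k) / 2 := by
    simpa using Int.shiftRight_eq_div_pow (2 * k) 1
  rw [this, Int.mul_ediv_cancel_left k (by norm_num)]
  omega

def goA (bitmask count : Int) : Bool :=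
  if h0 : bitmask = 0 then true
  else if h1 : PySem.Int.band bitmask 1 = 1 then
    if h2 : count + 1 > 2 then false
    else goA (bitmask >>> (1 : Nat)) (count + 1)
  else goA (bitmask >>> (1 : Nat)) count
termination_by ((3 - count).toNat, bitmask.natAbs)
decreasing_by
  · apply Prod.Lex.left; omega
  · have := pvShiftAbsLt bitmask h0 h1
    exact Prod.Lex.right _ this

def check_at_most_two (bitmask : Int) : Bool := goA bitmask 0

-- ===== PORT B =====
def goB (bitmask count : Int) : Bool :=
  if h0 : bitmask = 0 then true
  else
    let b' := PySem.Int.band bitmask (bitmask - 1)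
    if h2 : count + 1 > 2 then false
    else goB b' (count + 1)
termination_by (3 - count).toNat
decreasing_by omega

def check_at_most_two_alt (bitmask : Int) : Bool := goB bitmask 0

-- ===== PRECONDITION & SPEC =====
def Spec_check_at_most_two (bitmask : Int) (out : Bool) : Prop := out = check_at_most_two_alt bitmask
instance (bitmask : Int) (out : Bool) : Decidable (Spec_check_at_most_two bitmask out) := by unfold Spec_check_at_most_two; infer_instance

-- ===== CLAIM (what is proved, stated in full; the proofs are below) =====
def Claim_equal_check_at_most_two : Prop := ∀ (bitmask : Int), Dom_check_at_most_two bitmask → Spec_check_at_most_two bitmask (check_at_most_two bitmask)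

-- ===== LEMMAS AND PROOFS =====

-- popcount of a positive Nat is at least 1
theorem pvPcPos (m : Nat) (hm : 0 < m) : 1 ≤ PySem.Int.bitCount (m : Int) := by
  induction m using Nat.strong_induction_on with
  | _ m ih =>
    rw [PySem.Int.bitCount_natCast (show 0 < m by omega)]
    rcases Nat.even_or_odd m with he | ho
    · have h2 : 0 < m / 2 := by
        rcases he with ⟨k, hk⟩; omega
      have := ih (m / 2) (by omega) h2
      omega
    · have : m % 2 = 1 := Nat.odd_iff.mp ho
      omega

-- doubling does not change popcount
theorem pvPcDouble (j : Nat) : PySem.Int.bitCount ((2 * j : Nat) : Int) = PySem.Int.bitCount (j : Int) := by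
  rcases Nat.eq_zero_or_pos j with rfl | hj
  · simp
  · rw [PySem.Int.bitCount_natCast (show 0 < 2 * j by omega)]
    have h1 : (2 * j) % 2 = 0 := by omega
    have h2 : (2 * j) / 2 = j := by omega
    rw [h1, h2]
    omega

-- Kernighan at Nat level, odd case: m &&& (m-1) = m - 1
theorem pvLandOdd (k : Nat) : (2 * k + 1) &&& (2 * k) = 2 * k := by
  have h1 : (2 * k + 1) = Nat.bit true k := by simp [Nat.bit]
  have h2 : (2 * k) = Nat.bit false k := by simp [Nat.bit]
  rw [h1, h2, Nat.land_bit]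
  simp [Nat.bit, Nat.and_self]

-- Kernighan at Nat level, even case
theorem pvLandEven (k : Nat) (hk : 0 < k) :
    (2 * k) &&& (2 * k - 1) = 2 * (k &&& (k - 1)) := by
  have h1 : (2 * k) = Nat.bit false k := by simp [Nat.bit]
  have h2 : (2 * k - 1) = Nat.bit true (k - 1) := by simp [Nat.bit]; omega
  rw [h2, h1, Nat.land_bit]
  simp [Nat.bit]

-- clearing the lowest set bit drops popcount by exactly one (Nat level)
theorem pvPcClear (m : Nat) (hm : 0 < m) :
    PySem.Int.bitCount ((m &&& (m - 1) : Nat) : Int) + 1 = PySem.Int.bitCount (m : Int) := by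
  induction m using Nat.strong_induction_on with
  | _ m ih =>
    rcases Nat.even_or_odd m with he | ho
    · obtain ⟨k, hk⟩ := he
      have hk2 : m = 2 * k := by omega
      subst hk2
      have hkpos : 0 < k := by omega
      rw [pvLandEven k hkpos, pvPcDouble, pvPcDouble, ih k (by omega) hkpos]
    · obtain ⟨k, hk⟩ := ho
      subst hk
      have h1 : (2 * k + 1) &&& (2 * k + 1 - 1) = 2 * k := by
        simpa using pvLandOdd k
      rw [h1, pvPcDouble]
      rw [PySem.Int.bitCount_natCast (show 0 < 2 * k + 1 by omega)]
      have h2 : (2 * k + 1) % 2 = 1 := by omega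
      have h3 : (2 * k + 1) / 2 = k := by omega
      rw [h2, h3]
      omega

-- band of two negatives is negative
theorem pvBandNegNeg (a b : Int) (ha : a < 0) (hb : b < 0) : PySem.Int.band a b < 0 := by
  unfold PySem.Int.band
  rw [if_neg (by omega), if_neg (by omega)]
  have : (0 : Int) ≤ ((-a - 1).toNat ||| (-b - 1).toNat : Nat) := Int.natCast_nonneg _
  omega

-- Kernighan step at Int level, positive case
theorem pvKernighanInt (b : Int) (hb : 0 < b) :
    0 ≤ PySem.Int.band b (b - 1) ∧
    PySem.Int.bitCount (PySem.Int.band b (b - 1)) + 1 = PySem.Int.bitCount b := by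
  have h1 : PySem.Int.band b (b - 1) = ((b.toNat &&& (b - 1).toNat : Nat) : Int) :=
    PySem.Int.band_of_nonneg (by omega) (by omega)
  have hm : b = ((b.toNat : Nat) : Int) := by omega
  have h2 : (b - 1).toNat = b.toNat - 1 := by omega
  constructor
  · rw [h1]; exact Int.natCast_nonneg _
  · rw [h1, h2]
    conv_rhs => rw [hm]
    exact pvPcClear b.toNat (by omega)

-- characterization of A's loop
theorem pvGoAChar (b c : Int) (hc0 : 0 ≤ c) (hc2 : c ≤ 2) :
    goA b c = decide (0 ≤ b ∧ c + (PySem.Int.bitCount b : Int) ≤ 2) := by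
  revert hc0 hc2
  induction b, c using goA.induct with
  | case1 c =>
    intro hc0 hc2
    simp [goA, PySem.Int.bitCount_zero]
    omega
  | case2 b c h0 h1 h2 =>
    intro hc0 hc2
    rw [goA]
    rw [dif_neg h0, dif_pos h1, dif_pos h2]
    rcases (show b < 0 ∨ 0 ≤ b by omega) with hb | hb
    · simp; omega
    · have hbpos : 0 < b := by omega
      have hodd : PySem.Int.mod b 2 = 1 := by
        rw [← PySem.Int.band_one b]; exact h1
      have hpc : PySem.Int.bitCount b = (PySem.Int.mod b 2).toNat + PySem.Int.bitCount (PySem.Int.floordiv b 2) :=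
        PySem.Int.bitCount_of_pos hbpos
      rw [hodd] at hpc
      simp
      intro _
      omega
  | case3 b c h0 h1 h2 ih =>
    intro hc0 hc2
    rw [goA, dif_neg h0, dif_pos h1, dif_neg h2]
    have hsh : b >>> (1 : Nat) = b / 2 := by
      simpa using Int.shiftRight_eq_div_pow b 1
    rw [ih (by omega) (by omega), hsh]
    rcases (show b < 0 ∨ 0 ≤ b by omega) with hb | hb
    · rw [decide_eq_decide]
      constructor <;> (intro h; exact absurd h.1 (by omega))
    · have hbpos : 0 < b := by omega
      have hodd : PySem.Int.mod b 2 = 1 := by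
        rw [← PySem.Int.band_one b]; exact h1
      have hpc : PySem.Int.bitCount b = (PySem.Int.mod b 2).toNat + PySem.Int.bitCount (PySem.Int.floordiv b 2) :=
        PySem.Int.bitCount_of_pos hbpos
      have hfd : PySem.Int.floordiv b 2 = b / 2 := PySem.Int.floordiv_eq_ediv_of_pos (by norm_num)
      rw [hodd, hfd] at hpc
      have hd2 : 0 ≤ b / 2 := Int.ediv_nonneg hb (by norm_num)
      simp [hd2, hb]
      omega
  | case4 b c h0 h1 ih =>
    intro hc0 hc2
    rw [goA, dif_neg h0, dif_neg h1]
    have hsh : b >>> (1 : Nat) = b / 2 := by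
      simpa using Int.shiftRight_eq_div_pow b 1
    rw [ih hc0 hc2, hsh]
    have heven : PySem.Int.mod b 2 = 0 := by
      have hm2 : PySem.Int.mod b 2 = b % 2 := PySem.Int.mod_eq_emod_of_pos (by norm_num)
      have hb1 : PySem.Int.band b 1 = PySem.Int.mod b 2 := PySem.Int.band_one b
      rw [hb1, hm2] at h1
      have := Int.emod_two_eq_zero_or_one b
      omega
    rcases (show b < 0 ∨ 0 ≤ b by omega) with hb | hb
    · rw [decide_eq_decide]
      constructor <;> (intro h; exact absurd h.1 (by omega))
    · have hbpos : 0 < b := by omega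
      have hpc : PySem.Int.bitCount b = (PySem.Int.mod b 2).toNat + PySem.Int.bitCount (PySem.Int.floordiv b 2) :=
        PySem.Int.bitCount_of_pos hbpos
      have hfd : PySem.Int.floordiv b 2 = b / 2 := PySem.Int.floordiv_eq_ediv_of_pos (by norm_num)
      rw [heven, hfd] at hpc
      have hd2 : 0 ≤ b / 2 := Int.ediv_nonneg hb (by norm_num)
      simp [hd2, hb]
      omega

-- characterization of B's loop
theorem pvGoBChar (b c : Int) (hc0 : 0 ≤ c) (hc2 : c ≤ 2) :
    goB b c = decide (0 ≤ b ∧ c + (PySem.Int.bitCount b : Int) ≤ 2) := by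
  revert hc0 hc2
  induction b, c using goB.induct with
  | case1 c =>
    intro hc0 hc2
    simp [goB, PySem.Int.bitCount_zero]
    omega
  | case2 b c h0 h2 =>
    intro hc0 hc2
    rw [goB, dif_neg h0]
    simp only [dif_pos h2]
    rcases (show b < 0 ∨ 0 ≤ b by omega) with hb | hb
    · simp; omega
    · have : 1 ≤ PySem.Int.bitCount ((b.toNat : Nat) : Int) := pvPcPos b.toNat (by omega)
      have hm : ((b.toNat : Nat) : Int) = b := by omega
      rw [hm] at this
      simp
      intro _
      omega
  | case3 b c h0 b' h2 ih =>
    intro hc0 hc2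
    have hb' : b' = PySem.Int.band b (b - 1) := rfl
    rw [hb'] at ih
    rw [goB, dif_neg h0]
    simp only [dif_neg h2]
    rw [ih (by omega) (by omega)]
    rcases (show b < 0 ∨ 0 ≤ b by omega) with hb | hb
    · have := pvBandNegNeg b (b - 1) hb (by omega)
      rw [decide_eq_decide]
      constructor <;> (intro h; exact absurd h.1 (by omega))
    · obtain ⟨hnn, hpc⟩ := pvKernighanInt b (by omega)
      rw [decide_eq_decide]
      omega

-- ===== VERDICT (by name: the statement is the Claim_ definition above) =====
theorem check_at_most_two_spec : Claim_equal_check_at_most_two := by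
  intro b _
  unfold Spec_check_at_most_two check_at_most_two check_at_most_two_alt
  rw [pvGoAChar b 0 le_rfl (by norm_num), pvGoBChar b 0 le_rfl (by norm_num)]
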